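-- pv_equiv track=rewrite | github.com/pypi-data/pypi-mirror-379 | packages/netintel-ocr/netintel_ocr-0.1.18.2-cp311-cp311-manylinux2014_x86_64.manylinux_2_17_x86_64.whl/netintel_ocr/diagram_detection/improved_flow_extractor.py | _generate_clean_summary
-- ===== SOURCE A (Python) =====
-- from typing import Dict, Any, List, Optional, Set, Tuple
--
-- def _generate_clean_summary(extraction: Dict[str, Any]) -> str:
--     """Generate a clean, non-repetitive summary of the flow."""
--     elements = extraction.get('elements', [])
--     flows = extraction.get('flows', [])
--     loops = extraction.get('loops', [])
--
--     summary_parts = []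
--
--     # Find start points
--     start_elements = [e for e in elements if e.get('type') == 'start']
--     if start_elements:
--         summary_parts.append(f"Process starts with: {start_elements[0].get('label', 'Start')}")
--
--     # List key process steps
--     process_steps = [e for e in elements if e.get('type') == 'process']
--     if process_steps:
--         step_labels = [s.get('label', '') for s in process_steps[:5]]  # Limit to first 5
--         summary_parts.append(f"Key steps: {', '.join(step_labels)}")
--         if len(process_steps) > 5:
--             summary_parts.append(f"... and {len(process_steps) - 5} more steps")
--
--     # List decision points
--     decisions = [e for e in elements if e.get('type') == 'decision']
--     if decisions:
--         decision_labels = [d.get('label', '') for d in decisions[:3]]  # Limit to first 3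
--         summary_parts.append(f"Decision points: {', '.join(decision_labels)}")
--
--     # Mention loops
--     if loops:
--         summary_parts.append(f"Contains {len(loops)} loop(s)")
--
--     # Find end points
--     end_elements = [e for e in elements if e.get('type') == 'end']
--     if end_elements:
--         summary_parts.append(f"Process ends with: {end_elements[0].get('label', 'End')}")
--
--     return '\n'.join(summary_parts)
-- ===== SOURCE B (Python) =====
-- def _generate_clean_summary(extraction):
--     """Single-pass version: classify elements once into per-type label lists, then report."""
--     elements = extraction.get('elements', [])
--     loops = extraction.get('loops', [])
--
--     starts, procs, decs, ends = [], [], [], []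
--     for e in elements:
--         t = e.get('type')
--         if t == 'start':
--             starts.append(e.get('label', 'Start'))
--         elif t == 'process':
--             procs.append(e.get('label', ''))
--         elif t == 'decision':
--             decs.append(e.get('label', ''))
--         elif t == 'end':
--             ends.append(e.get('label', 'End'))
--
--     parts = []
--     if starts:
--         parts.append(f"Process starts with: {starts[0]}")
--     if procs:
--         parts.append(f"Key steps: {', '.join(procs[:5])}")
--         if len(procs) > 5:
--             parts.append(f"... and {len(procs) - 5} more steps")
--     if decs:
--         parts.append(f"Decision points: {', '.join(decs[:3])}")
--     if loops:
--         parts.append(f"Contains {len(loops)} loop(s)")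
--     if ends:
--         parts.append(f"Process ends with: {ends[0]}")
--     return '\n'.join(parts)
-- ===== Notes on version B (the rewrite author's own statement) =====
-- stated objective: simpler
-- what changed: B replaces A's four separate filter scans of elements with one classification pass that dispatches each element's label into per-type lists, after which the report only reads those lists.
import Mathlib
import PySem

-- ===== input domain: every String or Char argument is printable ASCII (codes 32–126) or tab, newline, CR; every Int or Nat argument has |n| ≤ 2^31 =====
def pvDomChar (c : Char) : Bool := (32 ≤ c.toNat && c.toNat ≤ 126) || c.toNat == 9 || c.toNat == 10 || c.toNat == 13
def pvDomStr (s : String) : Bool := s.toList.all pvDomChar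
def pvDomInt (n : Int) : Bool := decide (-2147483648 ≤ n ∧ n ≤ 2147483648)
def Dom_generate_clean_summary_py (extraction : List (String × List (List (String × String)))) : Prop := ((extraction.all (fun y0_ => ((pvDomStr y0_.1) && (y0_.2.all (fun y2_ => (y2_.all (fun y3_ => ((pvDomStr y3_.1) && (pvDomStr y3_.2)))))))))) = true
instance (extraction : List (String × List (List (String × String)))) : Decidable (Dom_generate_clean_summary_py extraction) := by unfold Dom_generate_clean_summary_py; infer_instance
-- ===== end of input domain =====

-- B replaces A's four filter scans of `elements` by one classification pass into per-type label lists; same output.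

-- ===== PORT A =====
def generate_clean_summary_py (extraction : List (String × List (List (String × String)))) : String :=
  let ext := PySem.Dict.mk extraction
  let elements := ext.getD "elements" []
  let _flows := ext.getD "flows" []
  let loops := ext.getD "loops" []
  let summary0 : List String := []
  let start_elements := elements.filter (fun e => (PySem.Dict.mk e).get? "type" == some "start")
  let summary1 := match start_elements with
    | [] => summary0
    | e :: _ => summary0 ++ ["Process starts with: " ++ (PySem.Dict.mk e).getD "label" "Start"]
  let process_steps := elements.filter (fun e => (PySem.Dict.mk e).get? "type" == some "process")
  let summary2 :=
    if process_steps.isEmpty then summary1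
    else
      let step_labels := (process_steps.take 5).map (fun s => (PySem.Dict.mk s).getD "label" "")
      let s2 := summary1 ++ ["Key steps: " ++ PySem.Str.join ", " step_labels]
      if process_steps.length > 5 then
        s2 ++ ["... and " ++ PySem.Int.toStr ((process_steps.length : Int) - 5) ++ " more steps"]
      else s2
  let decisions := elements.filter (fun e => (PySem.Dict.mk e).get? "type" == some "decision")
  let summary3 :=
    if decisions.isEmpty then summary2
    else summary2 ++ ["Decision points: " ++ PySem.Str.join ", " ((decisions.take 3).map (fun d => (PySem.Dict.mk d).getD "label" ""))]
  let summary4 :=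
    if loops.isEmpty then summary3
    else summary3 ++ ["Contains " ++ PySem.Int.toStr (loops.length : Int) ++ " loop(s)"]
  let end_elements := elements.filter (fun e => (PySem.Dict.mk e).get? "type" == some "end")
  let summary5 := match end_elements with
    | [] => summary4
    | e :: _ => summary4 ++ ["Process ends with: " ++ (PySem.Dict.mk e).getD "label" "End"]
  PySem.Str.join "\n" summary5

-- ===== PORT B =====
-- one classification step of B's loop
def pvClassify (acc : List String × List String × List String × List String)
    (e : List (String × String)) : List String × List String × List String × List String :=
  let t := (PySem.Dict.mk e).get? "type"
  if t == some "start" then (acc.1 ++ [(PySem.Dict.mk e).getD "label" "Start"], acc.2.1, acc.2.2.1, acc.2.2.2)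
  else if t == some "process" then (acc.1, acc.2.1 ++ [(PySem.Dict.mk e).getD "label" ""], acc.2.2.1, acc.2.2.2)
  else if t == some "decision" then (acc.1, acc.2.1, acc.2.2.1 ++ [(PySem.Dict.mk e).getD "label" ""], acc.2.2.2)
  else if t == some "end" then (acc.1, acc.2.1, acc.2.2.1, acc.2.2.2 ++ [(PySem.Dict.mk e).getD "label" "End"])
  else acc

def generate_clean_summary_py_alt (extraction : List (String × List (List (String × String)))) : String :=
  let ext := PySem.Dict.mk extraction
  let elements := ext.getD "elements" []
  let loops := ext.getD "loops" []
  let acc := elements.foldl pvClassify ([], [], [], [])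
  let starts := acc.1
  let procs := acc.2.1
  let decs := acc.2.2.1
  let ends := acc.2.2.2
  let parts0 : List String := []
  let parts1 := match starts with
    | [] => parts0
    | l :: _ => parts0 ++ ["Process starts with: " ++ l]
  let parts2 :=
    if procs.isEmpty then parts1
    else
      let p := parts1 ++ ["Key steps: " ++ PySem.Str.join ", " (procs.take 5)]
      if procs.length > 5 then p ++ ["... and " ++ PySem.Int.toStr ((procs.length : Int) - 5) ++ " more steps"] else p
  let parts3 :=
    if decs.isEmpty then parts2
    else parts2 ++ ["Decision points: " ++ PySem.Str.join ", " (decs.take 3)]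
  let parts4 := if loops.isEmpty then parts3 else parts3 ++ ["Contains " ++ PySem.Int.toStr (loops.length : Int) ++ " loop(s)"]
  let parts5 := match ends with
    | [] => parts4
    | l :: _ => parts4 ++ ["Process ends with: " ++ l]
  PySem.Str.join "\n" parts5

-- ===== PRECONDITION & SPEC =====
def Spec_generate_clean_summary_py (extraction : List (String × List (List (String × String)))) (out : String) : Prop := out = generate_clean_summary_py_alt extraction
instance (extraction : List (String × List (List (String × String)))) (out : String) : Decidable (Spec_generate_clean_summary_py extraction out) := by unfold Spec_generate_clean_summary_py; infer_instance

-- ===== CLAIM (what is proved, stated in full; the proofs are below) =====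
def Claim_equal_generate_clean_summary_py : Prop := ∀ (extraction : List (String × List (List (String × String)))), Dom_generate_clean_summary_py extraction → Spec_generate_clean_summary_py extraction (generate_clean_summary_py extraction)

-- ===== LEMMAS AND PROOFS =====

-- B's single pass computes exactly the four filtered-and-labelled lists A scans for
theorem pvClassify_spec (l : List (List (String × String))) (s p d e : List String) :
    l.foldl pvClassify (s, p, d, e) =
      (s ++ (l.filter (fun x => (PySem.Dict.mk x).get? "type" == some "start")).map (fun x => (PySem.Dict.mk x).getD "label" "Start"),
       p ++ (l.filter (fun x => (PySem.Dict.mk x).get? "type" == some "process")).map (fun x => (PySem.Dict.mk x).getD "label" ""),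
       d ++ (l.filter (fun x => (PySem.Dict.mk x).get? "type" == some "decision")).map (fun x => (PySem.Dict.mk x).getD "label" ""),
       e ++ (l.filter (fun x => (PySem.Dict.mk x).get? "type" == some "end")).map (fun x => (PySem.Dict.mk x).getD "label" "End")) := by
  induction l generalizing s p d e with
  | nil => simp
  | cons h t ih =>
    simp only [List.foldl_cons, List.filter_cons]
    cases hT : (PySem.Dict.mk h).get? "type" with
    | none => simp [pvClassify, hT, ih]
    | some ty =>
      by_cases hs : ty = "start"
      · subst hs; simp [pvClassify, hT, ih]
      · by_cases hp : ty = "process"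
        · subst hp; simp [pvClassify, hT, ih]
        · by_cases hd : ty = "decision"
          · subst hd; simp [pvClassify, hT, ih]
          · by_cases he : ty = "end"
            · subst he; simp [pvClassify, hT, ih]
            · simp [pvClassify, hT, hs, hp, hd, he, ih]

-- ===== VERDICT (by name: the statement is the Claim_ definition above) =====
theorem generate_clean_summary_py_spec : Claim_equal_generate_clean_summary_py := by
  intro extraction _
  unfold Spec_generate_clean_summary_py generate_clean_summary_py generate_clean_summary_py_alt
  simp only [pvClassify_spec, List.nil_append]
  cases ((PySem.Dict.mk extraction).getD "elements" []).filter
      (fun x => (PySem.Dict.mk x).get? "type" == some "start") <;>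
    cases ((PySem.Dict.mk extraction).getD "elements" []).filter
        (fun x => (PySem.Dict.mk x).get? "type" == some "end") <;>
      simp [List.map_take, List.length_map]
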